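-- pv_equiv track=rewrite | github.com/Hamulda/mcp-server | token_optimization_system.py | _trim_text_content
-- ===== SOURCE A (Python) =====
-- from typing import Dict, Any, List, Optional, Set, Union
--
-- def _trim_text_content(text: str, field_name: str, context: Optional[Dict]) -> str:
--     """Trimuje textový obsah inteligentně"""
--     if not text:
--         return text
--
--     # Field-specific limits
--     limits = {
--         'abstract': 500,
--         'summary': 300,
--         'content': 1000,
--         'full_text': 2000
--     }
--
--     max_length = limits.get(field_name, 500)
--
--     if len(text) <= max_length:
--         return text
--
--     # Smart trimming - try to preserve sentences
--     sentences = text.split('. ')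
--     trimmed = ""
--
--     for sentence in sentences:
--         if len(trimmed + sentence) <= max_length - 3:
--             trimmed += sentence + ". "
--         else:
--             break
--
--     if not trimmed:  # Fallback to simple truncation
--         trimmed = text[:max_length-3] + "..."
--     else:
--         trimmed = trimmed.strip()
--         if not trimmed.endswith('.'):
--             trimmed += "..."
--
--     return trimmed
-- ===== SOURCE B (Python) =====
-- from itertools import accumulate
-- from typing import Optional, Dict
--
--
-- def _trim_text_content(text: str, field_name: str, context: Optional[Dict]) -> str:
--     """Smart-trim text to a field-specific length, preserving whole sentences."""
--     if not text:
--         return text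
--
--     limits = {
--         'abstract': 500,
--         'summary': 300,
--         'content': 1000,
--         'full_text': 2000
--     }
--     max_length = limits.get(field_name, 500)
--
--     if len(text) <= max_length:
--         return text
--
--     sentences = text.split('. ')
--     # offsets[k] = number of characters the greedy result holds before sentence k
--     offsets = [0] + list(accumulate(len(s) + 2 for s in sentences))
--     i = next((k for k, s in enumerate(sentences)
--               if offsets[k] + len(s) > max_length - 3), len(sentences))
--
--     if i == 0:  # not even the first sentence fits
--         return text[:max_length - 3] + "..."
--     return ('. '.join(sentences[:i]) + '. ').strip()
-- ===== Notes on version B (the rewrite author's own statement) =====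
-- stated objective: alternative
-- what changed: Replaces the stateful accumulate-a-growing-string loop with a precomputed cumulative-offset table (itertools.accumulate), a single first-failing-index search, and one '. '.join of the fitting prefix instead of repeated string concatenation.
import Mathlib
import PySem

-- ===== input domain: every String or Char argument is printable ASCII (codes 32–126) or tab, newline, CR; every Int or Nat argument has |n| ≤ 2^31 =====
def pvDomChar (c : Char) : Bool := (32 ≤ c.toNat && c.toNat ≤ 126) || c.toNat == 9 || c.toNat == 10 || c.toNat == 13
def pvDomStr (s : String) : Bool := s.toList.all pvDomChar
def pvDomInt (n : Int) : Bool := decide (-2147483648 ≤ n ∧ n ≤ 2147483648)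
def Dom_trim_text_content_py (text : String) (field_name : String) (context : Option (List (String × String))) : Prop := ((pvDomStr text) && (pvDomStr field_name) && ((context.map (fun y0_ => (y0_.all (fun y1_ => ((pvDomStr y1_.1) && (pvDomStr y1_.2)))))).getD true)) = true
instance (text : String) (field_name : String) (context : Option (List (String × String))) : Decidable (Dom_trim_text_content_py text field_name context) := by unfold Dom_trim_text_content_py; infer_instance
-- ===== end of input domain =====

-- B replaces A's stateful accumulate-and-break loop with a cumulative-offset table,
-- a first-failing-index search and one join of the fitting sentence prefix (alternative decomposition).

-- ===== PORT A =====
-- the field-specific limits dict (shared module constant of both programs)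
def pvLimits : PySem.Dict String Int :=
  PySem.Dict.ofList [("abstract", 500), ("summary", 300), ("content", 1000), ("full_text", 2000)]

-- A's "for sentence in sentences: … else break" loop over the growing string `trimmed`
def pvTrimLoopA (maxLength : Int) : List (List Char) → List Char → List Char
  | [], trimmed => trimmed
  | s :: rest, trimmed =>
      if ((trimmed ++ s).length : Int) ≤ maxLength - 3 then
        pvTrimLoopA maxLength rest (trimmed ++ s ++ ['.', ' '])
      else trimmed

def trim_text_content_py (text : String) (field_name : String) (context : Option (List (String × String))) : String :=
  if text = "" then text
  else
    let max_length : Int := pvLimits.getD field_name 500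
    if (text.toList.length : Int) ≤ max_length then text
    else
      let sentences := PySem.Chars.splitOn text.toList ['.', ' ']
      let trimmed := pvTrimLoopA max_length sentences []
      if trimmed = [] then
        String.ofList (PySem.Chars.slice text.toList none (some (max_length - 3)) ++ ['.', '.', '.'])
      else
        let trimmed := PySem.Chars.strip trimmed
        if PySem.Chars.endswith trimmed ['.'] then String.ofList trimmed
        else String.ofList (trimmed ++ ['.', '.', '.'])

-- ===== PORT B =====
def trim_text_content_py_alt (text : String) (field_name : String) (context : Option (List (String × String))) : String :=
  if text = "" then text
  else
    let max_length : Int := pvLimits.getD field_name 500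
    if (text.toList.length : Int) ≤ max_length then text
    else
      let sentences := PySem.Chars.splitOn text.toList ['.', ' ']
      -- offsets = [0] + accumulate(len(s) + 2)
      let offsets := sentences.scanl (fun a s => a + (s.length : Int) + 2) 0
      -- first index whose sentence no longer fits, defaulting to len(sentences)
      let i := ((sentences.zip offsets).findIdx?
                  (fun p => decide (p.2 + (p.1.length : Int) > max_length - 3))).getD sentences.length
      if i = 0 then
        String.ofList (PySem.Chars.slice text.toList none (some (max_length - 3)) ++ ['.', '.', '.'])
      else
        String.ofList (PySem.Chars.strip (PySem.Chars.join ['.', ' '] (sentences.take i) ++ ['.', ' ']))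

-- ===== PRECONDITION & SPEC =====
def Spec_trim_text_content_py (text : String) (field_name : String) (context : Option (List (String × String))) (out : String) : Prop := out = trim_text_content_py_alt text field_name context
instance (text : String) (field_name : String) (context : Option (List (String × String))) (out : String) : Decidable (Spec_trim_text_content_py text field_name context out) := by unfold Spec_trim_text_content_py; infer_instance

-- ===== CLAIM (what is proved, stated in full; the proofs are below) =====
def Claim_equal_trim_text_content_py : Prop := ∀ (text : String) (field_name : String) (context : Option (List (String × String))), Dom_trim_text_content_py text field_name context → Spec_trim_text_content_py text field_name context (trim_text_content_py text field_name context)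

-- ===== LEMMAS AND PROOFS =====

-- number of leading sentences the greedy loop absorbs, starting from accumulated length `base`
def pvCnt (m base : Int) : List (List Char) → Nat
  | [] => 0
  | s :: rest =>
      if base + (s.length : Int) ≤ m - 3 then pvCnt m (base + s.length + 2) rest + 1 else 0

theorem pvTrimLoopA_eq (m : Int) (sents : List (List Char)) :
    ∀ trimmed, pvTrimLoopA m sents trimmed =
      trimmed ++ ((sents.take (pvCnt m trimmed.length sents)).map (· ++ ['.', ' '])).flatten := by
  induction sents with
  | nil => intro trimmed; simp [pvTrimLoopA, pvCnt]
  | cons s rest ih =>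
      intro trimmed
      by_cases h : (trimmed.length : Int) + (s.length : Int) ≤ m - 3
      · rw [pvTrimLoopA, if_pos (by simpa [Int.add_comm] using h), ih]
        rw [pvCnt, if_pos h]
        have hrw : (↑trimmed.length + ((s.length : Int) + 2)) = ((trimmed.length : Int) + ↑s.length + 2) := by ring
        simp [List.take_succ_cons, hrw]
      · rw [pvTrimLoopA, if_neg (by simpa [Int.add_comm] using h)]
        rw [pvCnt, if_neg h]
        simp

theorem pvFindIdx_eq_cnt (m : Int) (sents : List (List Char)) :
    ∀ base, ((sents.zip (sents.scanl (fun a s => a + (s.length : Int) + 2) base)).findIdx?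
        (fun p => decide (p.2 + (p.1.length : Int) > m - 3))).getD sents.length
      = pvCnt m base sents := by
  induction sents with
  | nil => intro base; simp [pvCnt]
  | cons s rest ih =>
      intro base
      rw [List.scanl_cons, List.zip_cons_cons, List.findIdx?_cons]
      by_cases h : base + (s.length : Int) ≤ m - 3
      · have hp : (decide (base + (s.length : Int) > m - 3)) = false := by
          simp; omega
        rw [hp]
        simp only [pvCnt, if_pos h, List.length_cons]
        rw [← ih (base + ↑s.length + 2)]
        cases (rest.zip (rest.scanl (fun a s => a + (s.length : Int) + 2) (base + ↑s.length + 2))).findIdx? (fun p => decide (p.2 + (p.1.length : Int) > m - 3)) with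
        | none => simp
        | some j => simp
      · have hp : (decide (base + (s.length : Int) > m - 3)) = true := by
          simp; omega
        rw [hp, pvCnt, if_neg h]
        simp

-- the flattened dotted prefix equals join ". " prefix ++ ". " when the prefix is nonempty
theorem pvFlatten_eq_join (l : List (List Char)) (h : l ≠ []) :
    (l.map (· ++ ['.', ' '])).flatten = PySem.Chars.join ['.', ' '] l ++ ['.', ' '] := by
  induction l with
  | nil => exact absurd rfl h
  | cons s rest ih =>
      cases rest with
      | nil => simp [PySem.Chars.join_singleton]
      | cons t r =>
          rw [List.map_cons, List.flatten_cons, ih (by simp), PySem.Chars.join_cons_cons]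
          simp

theorem pvStrip_append_dot_space (y : List Char) :
    PySem.Chars.strip (y ++ ['.', ' ']) = PySem.Chars.lstrip y ++ ['.'] := by
  have hdot : PySem.Chars.isspace '.' = false := by decide
  have hsp : PySem.Chars.isspace ' ' = true := by decide
  have hl : PySem.Chars.lstrip (y ++ ['.', ' ']) = PySem.Chars.lstrip y ++ ['.', ' '] := by
    rw [PySem.Chars.lstrip, PySem.Chars.lstrip, List.dropWhile_append]
    split_ifs with hy
    · rw [List.isEmpty_iff] at hy
      rw [hy, List.nil_append, List.dropWhile_cons, hdot]
      simp
    · rfl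
  have hr : ∀ z : List Char, PySem.Chars.rstrip (z ++ ['.', ' ']) = z ++ ['.'] := by
    intro z
    rw [PySem.Chars.rstrip, List.reverse_append]
    show (List.dropWhile PySem.Chars.isspace (' ' :: '.' :: z.reverse)).reverse = _
    rw [List.dropWhile_cons, hsp, List.dropWhile_cons, hdot]
    simp
  rw [PySem.Chars.strip, hl, hr]

-- the stripped greedy result ends with '.'
theorem pvEndswith_dot (y : List Char) :
    PySem.Chars.endswith (PySem.Chars.strip (y ++ ['.', ' '])) ['.'] = true := by
  rw [pvStrip_append_dot_space, PySem.Chars.endswith]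
  simp [List.isSuffixOf_iff_suffix]

-- ===== VERDICT (by name: the statement is the Claim_ definition above) =====
theorem trim_text_content_py_spec : Claim_equal_trim_text_content_py := by
  intro text field_name context _
  show trim_text_content_py text field_name context = trim_text_content_py_alt text field_name context
  unfold trim_text_content_py trim_text_content_py_alt
  by_cases h0 : text = ""
  · simp [h0]
  · rw [if_neg h0, if_neg h0]
    set m : Int := pvLimits.getD field_name 500 with hm
    by_cases h1 : (text.toList.length : Int) ≤ m
    · rw [if_pos h1, if_pos h1]
    · rw [if_neg h1, if_neg h1]
      set sents := PySem.Chars.splitOn text.toList ['.', ' '] with hs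
      have hloop : pvTrimLoopA m sents [] =
          ((sents.take (pvCnt m 0 sents)).map (· ++ ['.', ' '])).flatten := by
        simpa using pvTrimLoopA_eq m sents []
      have hidx : ((sents.zip (sents.scanl (fun a s => a + (s.length : Int) + 2) 0)).findIdx?
            (fun p => decide (p.2 + (p.1.length : Int) > m - 3))).getD sents.length
          = pvCnt m 0 sents := pvFindIdx_eq_cnt m sents 0
      simp only [hloop, hidx]
      by_cases hc : pvCnt m 0 sents = 0
      · simp [hc]
      · have htk : sents.take (pvCnt m 0 sents) ≠ [] := by
          intro he
          rcases List.take_eq_nil_iff.mp he with h' | h'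
          · exact hc h'
          · rw [h'] at hc; exact hc (by cases sents <;> simp_all [pvCnt])
        have hne : ((sents.take (pvCnt m 0 sents)).map (· ++ ['.', ' '])).flatten ≠ [] := by
          rcases List.exists_cons_of_ne_nil htk with ⟨a, l, hal⟩
          simp [hal]
        rw [if_neg hne, if_neg hc]
        rw [pvFlatten_eq_join _ htk, if_pos (pvEndswith_dot _)]
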